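-- pv_equiv track=rewrite | github.com/jkim439/Coding-Test | Programmers/Lv. 2/87390.py | solution
-- ===== SOURCE A (Python) =====
-- def solution(n, left, right):
--     answer = []
--
--     for i in range((left // n) + 1, (right // n) + 2):
--         if i == 1:
--             answer.extend([i for i in range(1, n + 1)])
--         elif 1 < i < n:
--             for _ in range(i):
--                 answer.append(i)
--             answer.extend([i for i in range(i + 1, n + 1)])
--         else:
--             answer.extend([n] * n)
--
--     return answer[left - n * (left // n) : (right - n * (left // n)) + 1]
-- ===== SOURCE B (Python) =====
-- def solution(n, left, right):
--     return [max(k // n, k % n) + 1 for k in range(left, right + 1)]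
-- ===== Notes on version B (the rewrite author's own statement) =====
-- stated objective: simpler
-- what changed: B computes each requested cell directly as max(k//n, k%n)+1 over k in [left, right] instead of materializing every full grid row touched by the range and slicing the concatenation.
-- outside the precondition, e.g. on solution(2, 0, 4): A returns [1, 2, 2, 2, 2], B returns [1, 2, 2, 2, 3]; on solution(3, -2, 3): A returns [3, 3, 1, 2, 3, 2], B returns [2, 3, 1, 2, 3, 2]; on solution(-2, 0, 1): A returns [], B returns [1, 0]
import Mathlib
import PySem

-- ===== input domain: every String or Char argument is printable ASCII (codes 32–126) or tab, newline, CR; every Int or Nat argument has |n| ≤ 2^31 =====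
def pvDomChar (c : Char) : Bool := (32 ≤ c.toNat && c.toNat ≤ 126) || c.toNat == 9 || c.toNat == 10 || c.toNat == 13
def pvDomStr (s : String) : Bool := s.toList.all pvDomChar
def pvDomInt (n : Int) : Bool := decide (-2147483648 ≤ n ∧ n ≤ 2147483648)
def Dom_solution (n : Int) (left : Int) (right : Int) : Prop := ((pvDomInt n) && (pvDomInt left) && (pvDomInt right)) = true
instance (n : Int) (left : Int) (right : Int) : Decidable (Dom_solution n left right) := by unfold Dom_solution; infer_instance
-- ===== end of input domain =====

-- B computes each requested cell directly as max(k//n, k%n)+1 instead of building whole grid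
-- rows and slicing the concatenation; a one-line closed form in place of the row loop.


-- ===== PORT A =====
def solution (n : Int) (left : Int) (right : Int) : List Int :=
  let answer : List Int := []
  let answer := (PySem.List.pyRange (PySem.Int.floordiv left n + 1) (PySem.Int.floordiv right n + 2) 1).foldl
    (fun answer i =>
      if i = 1 then
        answer ++ (PySem.List.pyRange 1 (n + 1) 1).map (fun i => i)
      else if 1 < i ∧ i < n then
        ((PySem.List.pyRange 0 i 1).foldl (fun answer _ => answer ++ [i]) answer)
          ++ (PySem.List.pyRange (i + 1) (n + 1) 1).map (fun i => i)
      else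
        answer ++ PySem.List.pyRepeat [n] n) answer
  PySem.List.slice answer (some (left - n * PySem.Int.floordiv left n))
    (some (right - n * PySem.Int.floordiv left n + 1))

-- ===== PORT B =====
def solution_alt (n : Int) (left : Int) (right : Int) : List Int :=
  (PySem.List.pyRange left (right + 1) 1).map
    (fun k => max (PySem.Int.floordiv k n) (PySem.Int.mod k n) + 1)

-- ===== PRECONDITION & SPEC =====
-- Pre_ is the problem's natural domain (1 ≤ n and, for a non-empty range, 0 ≤ left and
-- right < n²), plus every empty range right < left (any n ≠ 0): A raises ZeroDivisionError at
-- n = 0, and on the remaining excluded inputs (a non-empty range with n < 0, negative left or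
-- right ≥ n²) A's values are accidents of its row-building and slice arithmetic (clamping at
-- row n, negative floor-division of left).
def Pre_solution (n : Int) (left : Int) (right : Int) : Prop :=
  n ≠ 0 ∧ (right < left ∨ (1 ≤ n ∧ 0 ≤ left ∧ right < n * n))
instance (n : Int) (left : Int) (right : Int) : Decidable (Pre_solution n left right) := by
  unfold Pre_solution; infer_instance

def pvWitness_solution : Int × Int × Int := (3, 2, 7)

def Spec_solution (n : Int) (left : Int) (right : Int) (out : List Int) : Prop := out = solution_alt n left right
instance (n : Int) (left : Int) (right : Int) (out : List Int) : Decidable (Spec_solution n left right out) := by unfold Spec_solution; infer_instance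

-- ===== CLAIM (what is proved, stated in full; the proofs are below) =====
def Claim_equal_solution : Prop := ∀ (n : Int) (left : Int) (right : Int), Dom_solution n left right → Pre_solution n left right → Spec_solution n left right (solution n left right)

-- ===== LEMMAS AND PROOFS =====

-- the cell value B computes
def pvF (n k : Int) : Int := max (PySem.Int.floordiv k n) (PySem.Int.mod k n) + 1

-- the list appended by one iteration of A's loop (iteration variable i = row index + 1)
def pvRow (n i : Int) : List Int :=
  if i = 1 then (PySem.List.pyRange 1 (n + 1) 1).map (fun i => i)
  else if 1 < i ∧ i < n then
    List.replicate i.toNat i ++ (PySem.List.pyRange (i + 1) (n + 1) 1).map (fun i => i)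
  else PySem.List.pyRepeat [n] n

lemma pvBody_eq (n i : Int) (ans : List Int) :
    (if i = 1 then
        ans ++ (PySem.List.pyRange 1 (n + 1) 1).map (fun i => i)
      else if 1 < i ∧ i < n then
        ((PySem.List.pyRange 0 i 1).foldl (fun answer _ => answer ++ [i]) ans)
          ++ (PySem.List.pyRange (i + 1) (n + 1) 1).map (fun i => i)
      else
        ans ++ PySem.List.pyRepeat [n] n) = ans ++ pvRow n i := by
  unfold pvRow
  split_ifs with h1 h2
  · rfl
  · rw [PySem.List.foldl_append_singleton_eq_map]
    simp [List.map_const']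
  · rfl

lemma pvAnswer_eq (n a b : Int) :
    (PySem.List.pyRange a b 1).foldl
      (fun answer i =>
        if i = 1 then
          answer ++ (PySem.List.pyRange 1 (n + 1) 1).map (fun i => i)
        else if 1 < i ∧ i < n then
          ((PySem.List.pyRange 0 i 1).foldl (fun answer _ => answer ++ [i]) answer)
            ++ (PySem.List.pyRange (i + 1) (n + 1) 1).map (fun i => i)
        else
          answer ++ PySem.List.pyRepeat [n] n) []
    = (PySem.List.pyRange a b 1).flatMap (pvRow n) := by
  rw [PySem.List.foldl_congr_mem _ _ (fun ans i => ans ++ pvRow n i) _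
      (by intro acc x _; exact pvBody_eq n x acc)]
  rw [PySem.List.foldl_append_eq_flatMap]
  simp

lemma pvF_cell (n r c : Int) (hn : 0 < n) (hc0 : 0 ≤ c) (hcn : c < n) :
    pvF n (n * r + c) = max r c + 1 := by
  unfold pvF
  rw [PySem.Int.floordiv_eq_ediv_of_pos hn, PySem.Int.mod_eq_emod_of_pos hn]
  have h1 : (n * r + c) / n = c / n + r := by
    rw [(by ring : n * r + c = c + r * n)]
    exact Int.add_mul_ediv_right c r (by omega)
  have h2 : c / n = 0 := Int.ediv_eq_zero_of_lt hc0 hcn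
  have h3 : (n * r + c) % n = c := by
    rw [(by ring : n * r + c = c + n * r), Int.add_mul_emod_self_left]
    exact Int.emod_eq_of_lt hc0 hcn
  rw [h1, h2, h3, zero_add]

lemma pvRow_eq (n i : Int) (hn : 1 ≤ n) (h1 : 1 ≤ i) (h2 : i ≤ n) :
    pvRow n i = (PySem.List.pyRange (n * (i - 1)) (n * i) 1).map (pvF n) := by
  have hrhs : (PySem.List.pyRange (n * (i - 1)) (n * i) 1).map (pvF n)
      = (List.range n.toNat).map (fun k : Nat => max (i - 1) (k : Int) + 1) := by
    rw [PySem.List.pyRange_one]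
    have hlen : (n * i - n * (i - 1)).toNat = n.toNat := by
      have : n * i - n * (i - 1) = n := by ring
      rw [this]
    rw [hlen, List.map_map]
    refine List.map_congr_left ?_
    intro k hk
    simp only [Function.comp]
    rw [List.mem_range] at hk
    have : pvF n (n * (i - 1) + (k : Int)) = max (i - 1) (k : Int) + 1 :=
      pvF_cell n (i - 1) k (by omega) (by positivity) (by omega)
    exact this
  rw [hrhs]
  unfold pvRow
  split_ifs with hi1 hmid
  · subst hi1
    rw [PySem.List.pyRange_one]
    have : ((n : Int) + 1 - 1).toNat = n.toNat := by omega
    rw [this, List.map_map]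
    refine List.map_congr_left ?_
    intro k _
    simp only [Function.comp]
    omega
  · -- 1 < i < n
    apply List.ext_getElem
    · simp [PySem.List.length_pyRange_one]
      omega
    · intro j hj hj'
      simp only [List.length_map, List.length_range] at hj'
      simp only [List.getElem_map, List.getElem_range, List.getElem_append,
        List.length_replicate, List.getElem_replicate, PySem.List.getElem_pyRange_one]
      split_ifs with hcase
      · omega
      · omega
  · -- i = n (given 1 ≤ i ≤ n and not the other branches)
    have hin : i = n := by omega
    subst hin
    rw [PySem.List.pyRepeat_singleton]
    apply List.ext_getElem
    · simp
    · intro j hj hj'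
      simp only [List.length_map, List.length_range] at hj'
      simp only [List.getElem_replicate, List.getElem_map, List.getElem_range]
      omega

lemma pvSeg (n a b : Int) (hn : 1 ≤ n) (ha : 0 ≤ a) (hb : b ≤ n) (hab : a ≤ b) :
    (PySem.List.pyRange (a + 1) (b + 1) 1).flatMap (pvRow n)
      = (PySem.List.pyRange (n * a) (n * b) 1).map (pvF n) := by
  have key : ∀ (m : Nat), ∀ b : Int, (b - a).toNat = m → 0 ≤ a → b ≤ n → a ≤ b →
      (PySem.List.pyRange (a + 1) (b + 1) 1).flatMap (pvRow n)
        = (PySem.List.pyRange (n * a) (n * b) 1).map (pvF n) := by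
    intro m
    induction m with
    | zero =>
      intro b hm _ _ hab'
      have : b = a := by omega
      subst this
      rw [PySem.List.pyRange_one_eq_nil (by omega), PySem.List.pyRange_one_eq_nil (by omega)]
      simp
    | succ m ih =>
      intro b hm ha' hb' hab'
      have hlt : a < b := by omega
      rw [PySem.List.pyRange_one_succ_right (by omega)]
      rw [List.flatMap_append]
      have hih := ih (b - 1) (by omega) ha' (by omega) (by omega)
      rw [(by ring : (b : Int) - 1 + 1 = b)] at hih
      rw [hih]
      have hrow : pvRow n b = (PySem.List.pyRange (n * (b - 1)) (n * b) 1).map (pvF n) :=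
        pvRow_eq n b hn (by omega) hb'
      have hmono1 : n * a ≤ n * (b - 1) := by nlinarith
      have hmono2 : n * (b - 1) ≤ n * b := by nlinarith
      rw [PySem.List.pyRange_one_append (n * a) (n * (b - 1)) (n * b) hmono1 hmono2]
      simp [hrow]
  exact key (b - a).toNat b rfl ha hb hab

-- floor-division facts for the slice arithmetic
lemma pvFd_bounds (n x : Int) (hn : 0 < n) :
    n * PySem.Int.floordiv x n ≤ x ∧ x < n * (PySem.Int.floordiv x n + 1) := by
  rw [PySem.Int.floordiv_eq_ediv_of_pos hn]
  have h0 : 0 ≤ x % n := Int.emod_nonneg x (by omega)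
  have h1 : x % n < n := Int.emod_lt_of_pos x hn
  have h2 : n * (x / n) + x % n = x := Int.mul_ediv_add_emod x n
  refine ⟨by linarith, ?_⟩
  have h3 : n * (x / n + 1) = n * (x / n) + n := by ring
  rw [h3]; linarith

-- ===== VERDICT (by name: the statement is the Claim_ definition above) =====
-- with n < 0 every branch of A's loop body appends the empty list
lemma pvRow_neg (n i : Int) (hn : n < 0) : pvRow n i = [] := by
  unfold pvRow
  split_ifs with h1 h2
  · rw [PySem.List.pyRange_one_eq_nil (by omega)]; rfl
  · omega
  · rw [PySem.List.pyRepeat_singleton]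
    have : n.toNat = 0 := by omega
    simp [this]

theorem solution_spec : Claim_equal_solution := by
  unfold Claim_equal_solution
  intro n left right _ hpre
  obtain ⟨hn0, hrest⟩ := hpre
  unfold Spec_solution solution solution_alt
  simp only []
  set L := PySem.Int.floordiv left n with hL
  set R := PySem.Int.floordiv right n with hR
  rw [pvAnswer_eq]
  by_cases hlr : left ≤ right
  · -- main case: non-empty range, so 1 ≤ n, 0 ≤ left and right < n * n
    obtain ⟨hn, hleft, hright⟩ : 1 ≤ n ∧ 0 ≤ left ∧ right < n * n := by
      rcases hrest with h | h
      · omega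
      · exact h
    have hLb := pvFd_bounds n left (by omega)
    have hnL : n * L ≤ left := hLb.1
    have hLn : left < n * (L + 1) := hLb.2
    have hRb := pvFd_bounds n right (by omega)
    have hnR : n * R ≤ right := hRb.1
    have hRn : right < n * (R + 1) := hRb.2
    have hL0 : 0 ≤ L := by
      rw [hL, PySem.Int.floordiv_eq_ediv_of_pos (by omega)]
      exact Int.ediv_nonneg hleft (by omega)
    have hLR : L ≤ R := by nlinarith
    have hR1n : R + 1 ≤ n := by nlinarith
    have hseg : (PySem.List.pyRange (L + 1) (R + 2) 1).flatMap (pvRow n)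
        = (PySem.List.pyRange (n * L) (n * (R + 1)) 1).map (pvF n) := by
      have := pvSeg n L (R + 1) hn hL0 hR1n (by omega)
      rw [(by ring : R + 1 + 1 = R + 2)] at this
      exact this
    rw [hseg]
    rw [PySem.List.pyRange_one_append (n * L) left (n * (R + 1)) hnL (by omega)]
    rw [PySem.List.pyRange_one_append left (right + 1) (n * (R + 1)) (by omega) (by omega)]
    rw [List.map_append, List.map_append]
    rw [PySem.List.slice_toNat _ (by omega) (by omega)]
    have hdrop : (left - n * L).toNat
        = ((PySem.List.pyRange (n * L) left 1).map (pvF n)).length := by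
      simp [PySem.List.length_pyRange_one]
    rw [hdrop, List.drop_left]
    have htake : (right - n * L + 1).toNat - ((PySem.List.pyRange (n * L) left 1).map (pvF n)).length
        = ((PySem.List.pyRange left (right + 1) 1).map (pvF n)).length := by
      simp [PySem.List.length_pyRange_one]
      omega
    rw [htake, List.take_left]
    rfl
  · -- right < left: B's range is empty, and A's result is empty too
    have hBnil : PySem.List.pyRange left (right + 1) 1 = [] :=
      PySem.List.pyRange_one_eq_nil (by omega)
    rw [hBnil, List.map_nil]
    by_cases hneg : n < 0
    · -- n < 0: every row is empty, so answer = [] and any slice of [] is []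
      have hanil : (PySem.List.pyRange (L + 1) (R + 2) 1).flatMap (pvRow n) = [] := by
        apply List.flatMap_eq_nil_iff.mpr
        intro x _
        exact pvRow_neg n x hneg
      rw [hanil]
      simp [PySem.List.slice]
    · -- n ≥ 1: the slice has 0 ≤ start and stop ≤ start, hence is empty
      have hn : 1 ≤ n := by omega
      have hLb := pvFd_bounds n left (by omega)
      have hnL : n * L ≤ left := hLb.1
      have hRb := pvFd_bounds n right (by omega)
      have hnR : n * R ≤ right := hRb.1
      have hRL : R ≤ L := by
        rw [hL, hR, PySem.Int.floordiv_eq_ediv_of_pos (by omega), PySem.Int.floordiv_eq_ediv_of_pos (by omega)]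
        exact Int.ediv_le_ediv (by omega) (by omega)
      by_cases hRLe : R < L
      · rw [PySem.List.pyRange_one_eq_nil (by omega : (R : Int) + 2 ≤ L + 1)]
        simp [PySem.List.slice]
      · have hRL' : R = L := by omega
        rw [PySem.List.slice_toNat _ (by omega) (by rw [hRL'] at hnR; omega)]
        have : (right - n * L + 1).toNat - (left - n * L).toNat = 0 := by omega
        rw [this]
        simp
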